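-- pv_equiv track=rewrite | github.com/perryc/moxl | hardware/moxl-hat/gen_pinout_dxf.py | flatten_connectors
-- ===== SOURCE A (Python) =====
-- def flatten_connectors(conn_list):
--     """Flatten connector list into table rows + separator indices."""
--     rows = []
--     separators = []
--     for ci, (label, pins) in enumerate(conn_list):
--         if ci > 0:
--             separators.append(len(rows))
--         for pi, pin_name in enumerate(pins):
--             conn_label = label if pi == 0 else ""
--             rows.append((conn_label, str(pi + 1), pin_name))
--     return rows, separators
-- ===== SOURCE B (Python) =====
-- def flatten_connectors(conn_list):
--     """Flatten connector list into table rows + separator indices."""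
--     counts = [len(pins) for _, pins in conn_list]
--     separators = []
--     offset = 0
--     for c in counts[:-1]:
--         offset += c
--         separators.append(offset)
--     rows = [(label if pi == 0 else "", str(pi + 1), pin_name)
--             for label, pins in conn_list
--             for pi, pin_name in enumerate(pins)]
--     return rows, separators
-- ===== Notes on version B (the rewrite author's own statement) =====
-- stated objective: alternative
-- what changed: Separator indices are computed independently as prefix sums of per-connector pin counts (over all but the last connector), and rows are built by a flat nested comprehension, replacing A's single stateful pass that reads len(rows) inline.
import Mathlib
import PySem

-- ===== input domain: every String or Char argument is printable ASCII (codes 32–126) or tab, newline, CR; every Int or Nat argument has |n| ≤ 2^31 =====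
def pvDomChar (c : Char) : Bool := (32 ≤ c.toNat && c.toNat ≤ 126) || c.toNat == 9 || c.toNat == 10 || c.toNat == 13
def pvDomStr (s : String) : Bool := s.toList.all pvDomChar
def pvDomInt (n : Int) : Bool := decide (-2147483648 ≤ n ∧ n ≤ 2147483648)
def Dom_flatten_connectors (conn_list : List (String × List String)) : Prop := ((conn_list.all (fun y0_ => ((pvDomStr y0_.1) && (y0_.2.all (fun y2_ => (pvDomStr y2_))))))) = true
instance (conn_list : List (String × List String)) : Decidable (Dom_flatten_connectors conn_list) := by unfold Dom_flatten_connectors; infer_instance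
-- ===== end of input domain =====

-- B computes separators independently as prefix sums of pin counts (all but last connector)
-- and rows as a flat nested comprehension; alternative decomposition, same cost.

-- ===== PORT A =====
-- single pass over enumerate(conn_list), appending to rows and reading len(rows) inline
def flatten_connectors (conn_list : List (String × List String)) : (List (String × String × String)) × List Int :=
  (PySem.List.enumerate conn_list 0).foldl
    (fun st p =>
      let seps := if p.1 > 0 then st.2 ++ [(st.1.length : Int)] else st.2
      let rows := (PySem.List.enumerate p.2.2 0).foldl
          (fun r q => r ++ [((if q.1 = 0 then p.2.1 else ""), PySem.Int.toStr (q.1 + 1), q.2)]) st.1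
      (rows, seps))
    ([], [])

-- ===== PORT B =====
def flatten_connectors_alt (conn_list : List (String × List String)) : (List (String × String × String)) × List Int :=
  let counts : List Int := conn_list.map (fun p => (p.2.length : Int))
  let separators := (counts.dropLast.foldl
      (fun (st : List Int × Int) c => (st.1 ++ [st.2 + c], st.2 + c)) ([], 0)).1
  let rows := conn_list.flatMap (fun p =>
      (PySem.List.enumerate p.2 0).map
        (fun q => ((if q.1 = 0 then p.1 else ""), PySem.Int.toStr (q.1 + 1), q.2)))
  (rows, separators)

-- ===== PRECONDITION & SPEC =====
def Spec_flatten_connectors (conn_list : List (String × List String)) (out : (List (String × String × String)) × List Int) : Prop := out = flatten_connectors_alt conn_list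
instance (conn_list : List (String × List String)) (out : (List (String × String × String)) × List Int) : Decidable (Spec_flatten_connectors conn_list out) := by unfold Spec_flatten_connectors; infer_instance

-- ===== CLAIM (what is proved, stated in full; the proofs are below) =====
def Claim_equal_flatten_connectors : Prop := ∀ (conn_list : List (String × List String)), Dom_flatten_connectors conn_list → Spec_flatten_connectors conn_list (flatten_connectors conn_list)

-- ===== LEMMAS AND PROOFS =====

-- rows contributed by one connector
def pvRowsOf (p : String × List String) : List (String × String × String) :=
  (PySem.List.enumerate p.2 0).map
    (fun q => ((if q.1 = 0 then p.1 else ""), PySem.Int.toStr (q.1 + 1), q.2))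

-- separator offsets for a tail of connectors, starting at offset n
def pvSepsOf (l : List (String × List String)) (n : Int) : List Int :=
  match l with
  | [] => []
  | p :: l' => n :: pvSepsOf l' (n + p.2.length)

theorem pv_foldl_append_map {α β : Type} (f : α → β) :
    ∀ (l : List α) (r : List β),
      l.foldl (fun r q => r ++ [f q]) r = r ++ l.map f := by
  intro l
  induction l with
  | nil => simp
  | cons x xs ih => intro r; simp [List.foldl_cons, ih, List.append_assoc]

theorem pv_tail_fold :
    ∀ (l : List (String × List String)) (i : Int), 1 ≤ i →
      ∀ (rows : List (String × String × String)) (seps : List Int),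
      (PySem.List.enumerate l i).foldl
        (fun st p =>
          ((PySem.List.enumerate p.2.2 0).foldl
              (fun r q => r ++ [((if q.1 = 0 then p.2.1 else ""), PySem.Int.toStr (q.1 + 1), q.2)]) st.1,
           if p.1 > 0 then st.2 ++ [(st.1.length : Int)] else st.2))
        (rows, seps)
      = (rows ++ l.flatMap pvRowsOf, seps ++ pvSepsOf l (rows.length : Int)) := by
  intro l
  induction l with
  | nil => intro i hi rows seps; simp [PySem.List.enumerate_nil, pvSepsOf]
  | cons p l' ih =>
      intro i hi rows seps
      rw [PySem.List.enumerate_cons, List.foldl_cons]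
      have hpos : i > 0 := hi
      simp only [if_pos hpos]
      rw [pv_foldl_append_map]
      rw [ih (i + 1) (by omega)]
      have hlen : (((rows ++ (PySem.List.enumerate p.2 0).map
          (fun q => ((if q.1 = 0 then p.1 else ""), PySem.Int.toStr (q.1 + 1), q.2))).length : Int))
          = (rows.length : Int) + p.2.length := by
        simp [PySem.List.length_enumerate]
      rw [hlen]
      simp [pvRowsOf, pvSepsOf, List.append_assoc]

theorem pv_sepsB :
    ∀ (l : List (String × List String)) (p : String × List String)
      (acc : List Int) (off : Int),
      ((((p :: l).map (fun p => (p.2.length : Int))).dropLast).foldl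
        (fun (st : List Int × Int) c => (st.1 ++ [st.2 + c], st.2 + c)) (acc, off)).1
      = acc ++ pvSepsOf l (off + p.2.length) := by
  intro l
  induction l with
  | nil => intro p acc off; simp [pvSepsOf]
  | cons q l' ih =>
      intro p acc off
      have : (((p :: q :: l').map (fun p => (p.2.length : Int))).dropLast)
          = (p.2.length : Int) :: (((q :: l').map (fun p => (p.2.length : Int))).dropLast) := by
        simp [List.map_cons, List.dropLast_cons_of_ne_nil]
      rw [this, List.foldl_cons]
      rw [ih q (acc ++ [off + p.2.length]) (off + p.2.length)]
      simp [pvSepsOf, List.append_assoc]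

-- ===== VERDICT (by name: the statement is the Claim_ definition above) =====
theorem flatten_connectors_spec : Claim_equal_flatten_connectors := by
  intro conn_list _
  unfold Spec_flatten_connectors flatten_connectors flatten_connectors_alt
  cases conn_list with
  | nil => simp [PySem.List.enumerate_nil]
  | cons p l =>
      rw [PySem.List.enumerate_cons, List.foldl_cons]
      simp only [show ¬ ((0 : Int) > 0) by omega, if_false]
      rw [pv_foldl_append_map]
      rw [pv_tail_fold l (0 + 1) (by omega)]
      rw [pv_sepsB l p [] 0]
      simp [PySem.List.length_enumerate]
      rfl
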